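-- PySemCore.lean, part 3 of 8 (source lines 777-1240 of 3059): List (2/4): loop shapes (a Python for-loop ported as List.foldl) and the indexing / slicing / range bridge lemmas at natural indices.
-- An excerpt: the file's own header and imports are repeated below, the enclosing namespaces are reopened, and the other parts are separate documents.
import Lean.Meta.Tactic.Simp.RegisterCommand
/-
PySem — Python-exact primitives for the program-equivalence environment (pv_equiv).

A Lean port of a Python function should compute what the Python computes on every
admitted input. Ports diverge from their Python almost always at a dozen built-ins
(negative indexing, slicing, // and % with a negative divisor, dict overwrite order,
int() parsing, stable sort, min/max ties, the whitespace/digit/case sets of str), not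
in the algorithm. This module implements exactly those built-ins with CPython's
semantics (reference: CPython 3.13), so a port can call them instead of re-inventing
them. Where Python RAISES, the primitive returns `Option` (none = the exception) and a
decidable side condition in `PySem.Raise` names the inputs on which it does not, for
the port's `Pre_`.

Core Lean plus one Lean-frontend module for the `pysem` simp-set registration (no Mathlib import): it compiles in about a minute wherever the grader runs.
Every definition is computable; the `@[simp]` lemmas and the bridge lemmas reduce the
primitives to the usual List/Int/String functions under the side condition that makes
them agree, so proofs about honest ports stay in familiar territory. String functions
are exact on the environment's stated input domain (printable ASCII); outside it the
Unicode tables are not modelled in this version.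

GRADER CODE: kernel-checked, differentially tested against CPython (tests/), trusted.
-/

/-- The `pysem` simp set: every PySem lemma (tagged at the end of PySem.lean — an attribute cannot be used in the module that
registers it), so `simp only [pysem]` / `simp [pysem, …]` tries the whole prelude book without the author knowing each name.
(This import is the one non-core dependency of this file; it costs ≈50 s of compile per container — a third tiny module would
avoid it and is the planned refinement.) -/
register_simp_attr pysem

namespace PySem
namespace List
variable {α : Type}

/-! ### Lemma pack 3 — loop shapes. A Python 'for' loop ported as 'List.foldl' with an accumulator: the closed forms below turn the
fold into map / filter / flatMap / count / sum, so a proof never re-derives them by induction. -/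
section FoldShapes
variable {β γ δ : Type}

/-- 'out = acc; for x in l: out.append(f(x))' is acc ++ map f l. -/
theorem foldl_append_singleton_eq_map (f : α → β) (l : _root_.List α) (acc : _root_.List β) :
    l.foldl (fun acc x => acc ++ [f x]) acc = acc ++ l.map f := by
  induction l generalizing acc with
  | nil => simp
  | cons x t ih => simp [ih]
/-- 'for x in l: acc.append(x)' (copy loop). -/
theorem foldl_append_singleton_eq_self (l acc : _root_.List α) :
    l.foldl (fun acc x => acc ++ [x]) acc = acc ++ l := by
  induction l generalizing acc with
  | nil => simp
  | cons x t ih => simp [ih]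
/-- 'for x in l: if p(x): out.append(f(x))' is acc ++ (filter p l).map f  (Bool test). -/
theorem foldl_append_if (p : α → Bool) (f : α → β) (l : _root_.List α) (acc : _root_.List β) :
    l.foldl (fun acc x => if p x then acc ++ [f x] else acc) acc = acc ++ (l.filter p).map f := by
  induction l generalizing acc with
  | nil => simp
  | cons x t ih => cases hp : p x <;> simp [hp, ih]
/-- the same with a Prop test ('if x ∈ seen then …', 'if a < b then …'). -/
theorem foldl_append_ite (p : α → Prop) [DecidablePred p] (f : α → β) (l : _root_.List α) (acc : _root_.List β) :
    l.foldl (fun acc x => if p x then acc ++ [f x] else acc) acc = acc ++ (l.filter (fun x => decide (p x))).map f := by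
  induction l generalizing acc with
  | nil => simp
  | cons x t ih => by_cases hp : p x <;> simp [hp, ih]
/-- 'for x in l: if p(x): out.append(x)' is acc ++ filter p l. -/
theorem foldl_append_if_eq_filter (p : α → Bool) (l acc : _root_.List α) :
    l.foldl (fun acc x => if p x then acc ++ [x] else acc) acc = acc ++ l.filter p := by
  induction l generalizing acc with
  | nil => simp
  | cons x t ih => cases hp : p x <;> simp [hp, ih]
theorem foldl_append_ite_eq_filter (p : α → Prop) [DecidablePred p] (l acc : _root_.List α) :
    l.foldl (fun acc x => if p x then acc ++ [x] else acc) acc = acc ++ l.filter (fun x => decide (p x)) := by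
  induction l generalizing acc with
  | nil => simp
  | cons x t ih => by_cases hp : p x <;> simp [hp, ih]
/-- 'for x in l: out.extend(g(x))' / 'out += g(x)' is acc ++ flatMap g l. -/
theorem foldl_append_eq_flatMap (g : α → _root_.List β) (l : _root_.List α) (acc : _root_.List β) :
    l.foldl (fun acc x => acc ++ g x) acc = acc ++ l.flatMap g := by
  induction l generalizing acc with
  | nil => simp
  | cons x t ih => simp [ih]
/-- 'for chunk in xs: out += chunk' is acc ++ flatten xs. -/
theorem foldl_append_eq_flatten (xs : _root_.List (_root_.List α)) (acc : _root_.List α) :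
    xs.foldl (fun acc x => acc ++ x) acc = acc ++ xs.flatten := by
  induction xs generalizing acc with
  | nil => simp
  | cons x t ih => simp [ih]
/-- a loop body that only acts when p(x) holds is the loop over filter p l. -/
theorem foldl_if_eq_foldl_filter (p : α → Bool) (f : δ → α → δ) (l : _root_.List α) (init : δ) :
    l.foldl (fun acc x => if p x then f acc x else acc) init = (l.filter p).foldl f init := by
  induction l generalizing init with
  | nil => simp
  | cons x t ih => cases hp : p x <;> simp [hp, ih]
theorem foldl_ite_eq_foldl_filter (p : α → Prop) [DecidablePred p] (f : δ → α → δ) (l : _root_.List α) (init : δ) :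
    l.foldl (fun acc x => if p x then f acc x else acc) init = (l.filter (fun x => decide (p x))).foldl f init := by
  induction l generalizing init with
  | nil => simp
  | cons x t ih => by_cases hp : p x <;> simp [hp, ih]
/-- two loop bodies that agree on the list's elements give the same fold (rewrite INSIDE a ported loop). -/
theorem foldl_congr_mem (l : _root_.List α) (f g : β → α → β) (init : β) (h : ∀ acc x, x ∈ l → f acc x = g acc x) :
    l.foldl f init = l.foldl g init := by
  induction l generalizing init with
  | nil => rfl
  | cons x t ih =>
    simp only [_root_.List.foldl_cons]
    rw [h init x _root_.List.mem_cons_self]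
    exact ih _ (fun acc y hy => h acc y (_root_.List.mem_cons_of_mem _ hy))
/-- the same with the hypothesis in the other common order. -/
theorem foldl_congr_mem' (l : _root_.List α) (f g : β → α → β) (init : β) (h : ∀ x ∈ l, ∀ acc, f acc x = g acc x) :
    l.foldl f init = l.foldl g init :=
  foldl_congr_mem l f g init (fun acc x hx => h x hx acc)
/-- 'total = a; for x in l: total += g(x)' is a + sum (map g l)  (Int accumulator). -/
theorem foldl_add (l : _root_.List β) (g : β → _root_.Int) (a : _root_.Int) :
    l.foldl (fun acc x => acc + g x) a = a + (l.map g).sum := by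
  induction l generalizing a with
  | nil => simp
  | cons x t ih => simp [ih, Int.add_assoc]
theorem foldl_add_nat (l : _root_.List β) (g : β → Nat) (a : Nat) :
    l.foldl (fun acc x => acc + g x) a = a + (l.map g).sum := by
  induction l generalizing a with
  | nil => simp
  | cons x t ih => simp [ih, Nat.add_assoc]
/-- 'n = a; for x in l: if p(x): n += 1' is a + countP p l. -/
theorem foldl_if_add_one (p : α → Bool) (l : _root_.List α) (a : _root_.Int) :
    l.foldl (fun acc x => if p x then acc + 1 else acc) a = a + (l.countP p : _root_.Int) := by
  induction l generalizing a with
  | nil => simp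
  | cons x t ih => cases hp : p x <;> simp [hp, ih] <;> omega
theorem foldl_ite_add_one (p : α → Prop) [DecidablePred p] (l : _root_.List α) (a : _root_.Int) :
    l.foldl (fun acc x => if p x then acc + 1 else acc) a = a + (l.countP (fun x => decide (p x)) : _root_.Int) := by
  induction l generalizing a with
  | nil => simp
  | cons x t ih => by_cases hp : p x <;> simp [hp, ih] <;> omega
/-- 'for x in l: if x == v: n += 1' is a + l.count(v). -/
theorem foldl_beq_add_one [BEq α] (l : _root_.List α) (v : α) (a : _root_.Int) :
    l.foldl (fun acc x => if x == v then acc + 1 else acc) a = a + (l.count v : _root_.Int) := by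
  rw [foldl_if_add_one]; simp [_root_.List.count_eq_countP]
/-- a found-flag loop: 'ok = b; for x in l: if p(x): ok = False' is b && !any p l. -/
theorem foldl_if_false_eq (p : α → Bool) (l : _root_.List α) (b : Bool) :
    l.foldl (fun ok x => if p x then false else ok) b = (b && !l.any p) := by
  induction l generalizing b with
  | nil => simp
  | cons x t ih => rw [_root_.List.foldl_cons, ih]; cases hp : p x <;> cases b <;> simp [hp]
/-- 'found = b; for x in l: if p(x): found = True' is b || any p l. -/
theorem foldl_if_true_eq (p : α → Bool) (l : _root_.List α) (b : Bool) :
    l.foldl (fun ok x => if p x then true else ok) b = (b || l.any p) := by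
  induction l generalizing b with
  | nil => simp
  | cons x t ih => rw [_root_.List.foldl_cons, ih]; cases hp : p x <;> cases b <;> simp [hp]
theorem foldl_ite_false_eq (p : α → Prop) [DecidablePred p] (l : _root_.List α) (b : Bool) :
    l.foldl (fun ok x => if p x then false else ok) b = (b && !l.any (fun x => decide (p x))) := by
  induction l generalizing b with
  | nil => simp
  | cons x t ih => rw [_root_.List.foldl_cons, ih]; by_cases hp : p x <;> cases b <;> simp [hp]
theorem foldl_ite_true_eq (p : α → Prop) [DecidablePred p] (l : _root_.List α) (b : Bool) :
    l.foldl (fun ok x => if p x then true else ok) b = (b || l.any (fun x => decide (p x))) := by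
  induction l generalizing b with
  | nil => simp
  | cons x t ih => rw [_root_.List.foldl_cons, ih]; by_cases hp : p x <;> cases b <;> simp [hp]
/-- a loop that never changes its accumulator. -/
@[simp] theorem foldl_ignore (l : _root_.List α) (init : β) : l.foldl (fun acc _ => acc) init = init := by
  induction l <;> simp_all

end FoldShapes

/-! ### Lemma pack 3 — indexing / slicing / range bridge lemmas at NATURAL indices (the common case after 'for i in range(len(xs))'). -/

/-- xs[n] at a natural index is core's xs[n]? outright (none past the end on both sides). -/
@[simp] theorem pyGet?_natCast (xs : _root_.List α) (n : Nat) : pyGet? xs (n : _root_.Int) = xs[n]? := by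
  by_cases h : n < xs.length
  · rw [pyGet?_ofNat xs n h]; simp [h]
  · rw [(pyGet?_eq_none_iff xs n).mpr (fun ⟨_, h2⟩ => h (by exact_mod_cast h2))]; simp [_root_.List.getElem?_eq_none (Nat.le_of_not_lt h)]
/-- xs[i] for 0 ≤ i is xs[i.toNat]? (none past the end on both sides). -/
theorem pyGet?_of_nonneg (xs : _root_.List α) {i : _root_.Int} (h : 0 ≤ i) : pyGet? xs i = xs[i.toNat]? := by
  obtain ⟨n, rfl⟩ := Int.eq_ofNat_of_zero_le h
  rw [pyGet?_natCast]; simp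
@[simp] theorem pyGetD_natCast (xs : _root_.List α) (n : Nat) (d : α) : pyGetD xs (n : _root_.Int) d = xs.getD n d := by
  simp [pyGetD, _root_.List.getD_eq_getElem?_getD]
theorem pyGetD_eq_getElem (xs : _root_.List α) {i : _root_.Int} (d : α) (h0 : 0 ≤ i) (h1 : i < xs.length) :
    pyGetD xs i d = xs[i.toNat]'(by omega) := by
  simp [pyGetD, pyGet?_of_nonneg xs h0, _root_.List.getElem?_eq_getElem (show i.toNat < xs.length by omega)]
/-- xs[n+1] of a cons is xs-tail[n]. -/
@[simp] theorem pyGet?_cons_succ (x : α) (xs : _root_.List α) (n : Nat) : pyGet? (x :: xs) ((n : _root_.Int) + 1) = pyGet? xs n := by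
  rw [show ((n : _root_.Int) + 1) = ((n + 1 : Nat) : _root_.Int) by simp, pyGet?_natCast, pyGet?_natCast]; simp
/-- (pre ++ ys)[len(pre) + k] is ys[k]. -/
theorem pyGet?_append_right (pre ys : _root_.List α) (k : Nat) : pyGet? (pre ++ ys) ((pre.length : _root_.Int) + k) = ys[k]? := by
  rw [show ((pre.length : _root_.Int) + k) = ((pre.length + k : Nat) : _root_.Int) by simp, pyGet?_natCast,
    _root_.List.getElem?_append_right (by omega)]; simp
theorem pyGet?_append_length (pre ys : _root_.List α) (y : α) : pyGet? (pre ++ y :: ys) (pre.length : _root_.Int) = some y := by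
  rw [pyGet?_natCast, _root_.List.getElem?_append_right (by omega)]; simp
/-- xs[-k] for 0 < k ≤ len is the element k from the end. -/
theorem pyGet?_neg_natCast (xs : _root_.List α) (k : Nat) (hk : 0 < k) (hk' : k ≤ xs.length) :
    pyGet? xs (-(k : _root_.Int)) = xs[xs.length - k]? := by
  rw [pyGet?_neg xs (by omega) (by omega)]; congr 1; omega
theorem pyGetD_neg_natCast (xs : _root_.List α) (k : Nat) (d : α) (hk : 0 < k) (hk' : k ≤ xs.length) :
    pyGetD xs (-(k : _root_.Int)) d = xs[xs.length - k]'(by omega) := by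
  simp [pyGetD, pyGet?_neg_natCast xs k hk hk', _root_.List.getElem?_eq_getElem (show xs.length - k < xs.length by omega)]
/-- the element Python reads is a member of the list. -/
theorem mem_of_pyGet?_eq_some (xs : _root_.List α) {i : _root_.Int} {x : α} (h : pyGet? xs i = some x) : x ∈ xs := by
  unfold pyGet? at h
  cases hk : pyIdx? xs.length i with
  | none => simp [hk] at h
  | some k => simp only [hk, Option.bind_some] at h; exact _root_.List.mem_of_getElem? h
theorem pyGetD_mem (xs : _root_.List α) {i : _root_.Int} (d : α) (h : Raise.InRange xs.length i) : pyGetD xs i d ∈ xs := by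
  cases hg : pyGet? xs i with
  | none => exact absurd ((pyGet?_eq_none_iff xs i).mp hg) (fun hn => hn h)
  | some x => simp [pyGetD, hg]; exact mem_of_pyGet?_eq_some xs hg
/-- xs[n] = v at a natural index in range is core's set. -/
@[simp] theorem pySet?_natCast (xs : _root_.List α) (n : Nat) (v : α) (h : n < xs.length) : pySet? xs (n : _root_.Int) v = some (xs.set n v) := by
  simp [pySet?, pyIdx?, h]
theorem pySet?_eq_none_iff (xs : _root_.List α) (i : _root_.Int) (v : α) : pySet? xs i v = none ↔ ¬ Raise.InRange xs.length i := by
  simp only [pySet?, pyIdx?, Raise.InRange]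
  split <;> split <;> simp <;> omega
/-- Python xs[i] = v kept total: the list unchanged where Python would raise — ONLY for ports whose Pre_ states Raise.InRange xs.length i. -/
def pySetD (xs : _root_.List α) (i : _root_.Int) (v : α) : _root_.List α := (pySet? xs i v).getD xs
/-- at a natural index pySetD is core's List.set outright (both leave the list alone past the end). -/
@[simp] theorem pySetD_natCast (xs : _root_.List α) (n : Nat) (v : α) : pySetD xs (n : _root_.Int) v = xs.set n v := by
  by_cases h : n < xs.length
  · simp [pySetD, h]
  · have : pySet? xs (n : _root_.Int) v = none := (pySet?_eq_none_iff xs n v).mpr (fun ⟨_, h2⟩ => h (by exact_mod_cast h2))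
    simp [pySetD, this, _root_.List.set_eq_of_length_le (Nat.le_of_not_lt h)]
@[simp] theorem length_pySetD (xs : _root_.List α) (i : _root_.Int) (v : α) : (pySetD xs i v).length = xs.length := by
  unfold pySetD pySet?; cases pyIdx? xs.length i <;> simp
theorem pyGetD_pySetD_natCast (xs : _root_.List α) (n m : Nat) (v d : α) (hn : n < xs.length) :
    pyGetD (pySetD xs n v) m d = if m = n then v else pyGetD xs m d := by
  simp only [pySetD_natCast, pyGetD_natCast, _root_.List.getD_eq_getElem?_getD]
  by_cases h : m = n
  · subst h; simp [hn]
  · rw [_root_.List.getElem?_set_ne (Ne.symm h)]; simp [h]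

/-- xs.pop(n) at an in-range natural index. -/
theorem pop?_natCast (xs : _root_.List α) (n : Nat) (h : n < xs.length) : pop? xs (n : _root_.Int) = some (xs[n], xs.eraseIdx n) := by
  simp [pop?, pyIdx?, h]
theorem length_of_pop?_eq_some (xs : _root_.List α) {i : _root_.Int} {r : α × _root_.List α} (h : pop? xs i = some r) : r.2.length + 1 = xs.length := by
  unfold pop? at h
  cases hk : pyIdx? xs.length i with
  | none => simp [hk] at h
  | some k =>
    simp only [hk, Option.bind_some] at h
    cases hx : xs[k]? with
    | none => simp [hx] at h
    | some x =>
      simp only [hx, Option.map_some, Option.some.injEq] at h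
      subst h
      have hk' : k < xs.length := (_root_.List.getElem?_eq_some_iff.mp hx).1
      simp [_root_.List.length_eraseIdx, hk']; omega
/-- xs.remove(v) when v is the head / is not the head. -/
@[simp] theorem remove?_cons_self [BEq α] [LawfulBEq α] (x : α) (xs : _root_.List α) : remove? (x :: xs) x = some xs := by
  simp [remove?, _root_.List.idxOf?_cons]
theorem remove?_cons_of_ne [BEq α] [LawfulBEq α] {x v : α} (xs : _root_.List α) (h : x ≠ v) :
    remove? (x :: xs) v = (remove? xs v).map (fun t => x :: t) := by
  have hb : (x == v) = false := by simpa [beq_iff_eq] using h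
  simp [remove?, _root_.List.idxOf?_cons, hb, Option.map_map, Function.comp_def]
/-- xs.remove(v) for a present v is core's erase (first occurrence). -/
theorem remove?_eq_some_erase [BEq α] [LawfulBEq α] (xs : _root_.List α) (v : α) (h : v ∈ xs) : remove? xs v = some (xs.erase v) := by
  induction xs with
  | nil => simp at h
  | cons x t ih =>
    by_cases hx : x = v
    · subst hx; simp
    · rw [remove?_cons_of_ne t hx, _root_.List.erase_cons_tail (by simpa [beq_iff_eq] using hx)]
      have : v ∈ t := by simpa [Ne.symm hx] using h
      simp [ih this]
/-- xs.index(v) on a cons: found at the head, or one past where the tail finds it. -/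
theorem index?_cons_self [BEq α] [LawfulBEq α] (x : α) (xs : _root_.List α) : index? (x :: xs) x = some 0 := by
  simp [index?, _root_.List.idxOf?_cons]
theorem index?_cons_of_ne [BEq α] [LawfulBEq α] {x v : α} (xs : _root_.List α) (h : x ≠ v) : index? (x :: xs) v = (index? xs v).map (· + 1) := by
  have hb : (x == v) = false := by simpa [beq_iff_eq] using h
  simp [index?, _root_.List.idxOf?_cons, hb]
/-- l + [c] . index(c) for a fresh c is len(l). -/
theorem index?_append_singleton_self [BEq α] [LawfulBEq α] (l : _root_.List α) (c : α) (h : c ∉ l) : index? (l ++ [c]) c = some l.length := by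
  induction l with
  | nil => simp
  | cons x t ih =>
    have hx : x ≠ c := fun e => h (e ▸ _root_.List.mem_cons_self)
    rw [_root_.List.cons_append, index?_cons_of_ne _ hx, ih (fun hm => h (_root_.List.mem_cons_of_mem _ hm))]; simp
theorem index?_isSome_iff [BEq α] [LawfulBEq α] (xs : _root_.List α) (v : α) : (index? xs v).isSome ↔ v ∈ xs := by
  rw [Option.isSome_iff_ne_none, ne_eq, index?_eq_none_iff]; simp

/-- an element of a slice is an element of the list. -/
theorem mem_of_mem_slice (xs : _root_.List α) (a? b? : Option _root_.Int) {x : α} (h : x ∈ slice xs a? b?) : x ∈ xs := by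
  simp only [slice] at h; exact _root_.List.mem_of_mem_drop (_root_.List.mem_of_mem_take h)
@[simp] theorem clampIdx_le (n : Nat) (i : _root_.Int) : clampIdx n i ≤ n := by
  unfold clampIdx; split <;> (try split) <;> omega
@[simp] theorem clampIdx_natCast (n k : Nat) : clampIdx n (k : _root_.Int) = min k n := by
  rw [clampIdx_of_nonneg (by omega)]; simp
/-- xs[a:b] at NATURAL bounds is drop/take outright — no side conditions (both sides clamp the same way). -/
theorem slice_natCast (xs : _root_.List α) (a b : Nat) : slice xs (some (a : _root_.Int)) (some (b : _root_.Int)) = (xs.drop a).take (b - a) := by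
  simp only [slice, clampIdx_natCast]
  by_cases ha : a ≤ xs.length
  · by_cases hb : b ≤ xs.length
    · rw [Nat.min_eq_left ha, Nat.min_eq_left hb]
    · rw [Nat.min_eq_left ha, Nat.min_eq_right (by omega), _root_.List.take_of_length_le (by simp),
        _root_.List.take_of_length_le (by simp; omega)]
  · have hn : xs.length ≤ a := by omega
    rw [Nat.min_eq_right hn, _root_.List.drop_of_length_le hn, _root_.List.drop_of_length_le (Nat.le_refl _)]; simp
/-- xs[j:j+n] at natural j, n is (drop j xs).take n. -/
theorem slice_natCast_add (xs : _root_.List α) (j n : Nat) :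
    slice xs (some (j : _root_.Int)) (some ((j : _root_.Int) + (n : _root_.Int))) = (xs.drop j).take n := by
  rw [show ((j : _root_.Int) + (n : _root_.Int)) = ((j + n : Nat) : _root_.Int) by simp, slice_natCast]; simp
/-- xs[:b] / xs[a:] at natural bounds. -/
@[simp] theorem slice_to_natCast (xs : _root_.List α) (b : Nat) : slice xs none (some (b : _root_.Int)) = xs.take b := by
  rw [slice_to xs (by omega)]; simp
@[simp] theorem slice_from_natCast (xs : _root_.List α) (a : Nat) : slice xs (some (a : _root_.Int)) none = xs.drop a := by
  rw [slice_from xs (by omega)]; simp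
/-- xs[0:b] is xs[:b] (a literal 0 start). -/
@[simp] theorem slice_zero_start (xs : _root_.List α) (b? : Option _root_.Int) : slice xs (some 0) b? = slice xs none b? := by
  simp [slice, clampIdx]
/-- xs[a:] for ANY a is a drop to the clamped position. -/
theorem slice_some_none (xs : _root_.List α) (a : _root_.Int) : slice xs (some a) none = xs.drop (clampIdx xs.length a) := by
  simp only [slice]; rw [_root_.List.take_of_length_le (by simp)]
/-- xs[:-k] / xs[-k:] for 0 < k ≤ len: all but the last k / the last k. -/
theorem slice_to_neg_natCast (xs : _root_.List α) (k : Nat) (hk : 0 < k) : slice xs none (some (-(k : _root_.Int))) = xs.take (xs.length - k) := by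
  simp only [slice]
  have : clampIdx xs.length (-(k : _root_.Int)) = xs.length - k := by unfold clampIdx; split <;> (try split) <;> omega
  simp [this]
theorem slice_from_neg_natCast (xs : _root_.List α) (k : Nat) (hk : 0 < k) : slice xs (some (-(k : _root_.Int))) none = xs.drop (xs.length - k) := by
  rw [slice_some_none]
  have : clampIdx xs.length (-(k : _root_.Int)) = xs.length - k := by unfold clampIdx; split <;> (try split) <;> omega
  rw [this]
/-- the length of any step-1 slice. -/
theorem length_slice (xs : _root_.List α) (a b : _root_.Int) :
    (slice xs (some a) (some b)).length = clampIdx xs.length b - clampIdx xs.length a := by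
  simp only [slice, _root_.List.length_take, _root_.List.length_drop]
  have := clampIdx_le xs.length b; omega

/-- range(a, b) split at an intermediate point: range(a, m) ++ range(m, b). -/
theorem pyRange_one_append (a m b : _root_.Int) (h1 : a ≤ m) (h2 : m ≤ b) : pyRange a b 1 = pyRange a m 1 ++ pyRange m b 1 := by
  rw [pyRange_one, pyRange_one, pyRange_one]
  have hn : (b - a).toNat = (m - a).toNat + (b - m).toNat := by omega
  rw [hn, _root_.List.range_add, _root_.List.map_append, _root_.List.map_map]
  congr 1
  apply _root_.List.map_congr_left; intro k hk; simp; omega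
/-- the k-th element of range(a, b) is a + k. -/
@[simp] theorem getElem?_pyRange_one (a b : _root_.Int) (k : Nat) : (pyRange a b 1)[k]? = if k < (b - a).toNat then some (a + k) else none := by
  rw [pyRange_one]; split
  · rw [_root_.List.getElem?_map, _root_.List.getElem?_range (by assumption)]; rfl
  · rw [_root_.List.getElem?_eq_none (by simp; omega)]
@[simp] theorem getElem_pyRange_one (a b : _root_.Int) (k : Nat) (h : k < (pyRange a b 1).length) : (pyRange a b 1)[k] = a + k := by
  apply Option.some.inj; rw [← _root_.List.getElem?_eq_getElem, getElem?_pyRange_one]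
  simp only [length_pyRange_one] at h; simp [h]
/-- range(a, b) is strictly increasing, hence duplicate-free. -/
theorem pairwise_lt_pyRange_one (a b : _root_.Int) : (pyRange a b 1).Pairwise (· < ·) := by
  rw [pyRange_one, _root_.List.pairwise_map]
  exact _root_.List.Pairwise.imp (fun h => by omega) _root_.List.pairwise_lt_range
theorem nodup_pyRange_one (a b : _root_.Int) : (pyRange a b 1).Nodup :=
  _root_.List.Pairwise.imp (fun h => by omega) (pairwise_lt_pyRange_one a b)
/-- range(a, b, -1): counting down, as an explicit map / by unrolling. -/
theorem pyRange_neg_one (a b : _root_.Int) : pyRange a b (-1) = (_root_.List.range (a - b).toNat).map fun (k : Nat) => a - (k : _root_.Int) := by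
  unfold pyRange
  have h1 : ¬ ((-1 : _root_.Int) = 0) := by decide
  have h2 : ¬ ((0 : _root_.Int) < -1) := by decide
  simp only [h1, h2, ↓reduceIte, Int.neg_neg, Int.ediv_one]
  by_cases h : b < a
  · simp only [h, ↓reduceIte]
    rw [show a - b + 1 - 1 = a - b by omega]
    apply _root_.List.map_congr_left; intro k _; omega
  · simp only [h, ↓reduceIte]
    have : (a - b).toNat = 0 := by omega
    rw [this]; rfl
@[simp] theorem pyRange_neg_one_eq_nil {a b : _root_.Int} (h : a ≤ b) : pyRange a b (-1) = [] := by
  have : (a - b).toNat = 0 := by omega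
  simp [pyRange_neg_one, this]
theorem pyRange_neg_one_cons {a b : _root_.Int} (h : b < a) : pyRange a b (-1) = a :: pyRange (a - 1) b (-1) := by
  rw [pyRange_neg_one, pyRange_neg_one]
  have hn : (a - b).toNat = (a - 1 - b).toNat + 1 := by omega
  rw [hn, _root_.List.range_succ_eq_map]
  simp [_root_.List.map_map, Function.comp_def]
  intro k _; omega
@[simp] theorem mem_pyRange_neg_one {a b x : _root_.Int} : x ∈ pyRange a b (-1) ↔ b < x ∧ x ≤ a := by
  simp [pyRange_neg_one, _root_.List.mem_map, _root_.List.mem_range]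
  constructor
  · rintro ⟨k, hk, rfl⟩; omega
  · intro h; exact ⟨(a - x).toNat, by omega, by omega⟩
@[simp] theorem length_pyRange_neg_one (a b : _root_.Int) : (pyRange a b (-1)).length = (a - b).toNat := by simp [pyRange_neg_one]
/-- range(a, b, -1) is range(b+1, a+1) reversed (the usual way to reason about a countdown). -/
theorem pyRange_neg_one_eq_reverse (a b : _root_.Int) : pyRange a b (-1) = (pyRange (b + 1) (a + 1) 1).reverse := by
  suffices H : ∀ (n : Nat) (a : _root_.Int), (a - b).toNat = n → pyRange a b (-1) = (pyRange (b + 1) (a + 1) 1).reverse from H _ a rfl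
  intro n
  induction n with
  | zero => intro a h; rw [pyRange_neg_one_eq_nil (by omega), pyRange_one_eq_nil (by omega)]; rfl
  | succ n ih =>
    intro a h
    rw [pyRange_neg_one_cons (by omega), ih (a - 1) (by omega), show a - 1 + 1 = a by omega,
      pyRange_one_succ_right (show b + 1 ≤ a by omega)]
    simp
/-- 'for i in range(a, len(xs)): … xs[i] …' reads exactly the elements of xs from position a on. -/
theorem map_pyGetD_pyRange (xs : _root_.List α) (d : α) {a : _root_.Int} (ha : 0 ≤ a) :
    (pyRange a (len xs) 1).map (fun j => pyGetD xs j d) = xs.drop a.toNat := by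
  apply _root_.List.ext_getElem?; intro i
  simp only [_root_.List.getElem?_map, getElem?_pyRange_one, len_eq, _root_.List.getElem?_drop]
  split
  · rename_i hi
    have e : a + (i : _root_.Int) = ((a.toNat + i : Nat) : _root_.Int) := by omega
    simp only [Option.map_some, e, pyGetD_natCast, _root_.List.getD_eq_getElem?_getD]
    rw [_root_.List.getElem?_eq_getElem (show a.toNat + i < xs.length by omega)]; simp
  · rw [Option.map_none, eq_comm, _root_.List.getElem?_eq_none (by omega)]
theorem map_pyGetD_pyRange_zero (xs : _root_.List α) (d : α) : (pyRange 0 (len xs) 1).map (fun j => pyGetD xs j d) = xs := by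
  simpa using map_pyGetD_pyRange xs d (Int.le_refl 0)
/-- the same two facts with the bound written '(xs.length : Int)' — the form 'simp' leaves (len_eq is @[simp]). -/
theorem map_pyGetD_pyRange' (xs : _root_.List α) (d : α) {a : _root_.Int} (ha : 0 ≤ a) :
    (pyRange a (xs.length : _root_.Int) 1).map (fun j => pyGetD xs j d) = xs.drop a.toNat := map_pyGetD_pyRange xs d ha
theorem map_pyGetD_pyRange_zero' (xs : _root_.List α) (d : α) : (pyRange 0 (xs.length : _root_.Int) 1).map (fun j => pyGetD xs j d) = xs :=
  map_pyGetD_pyRange_zero xs d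
/-- … so an index loop over range(a, len(xs)) is the element loop over xs[a:]. -/
theorem foldl_pyRange_pyGetD {β : Type} (xs : _root_.List α) (d : α) (f : β → α → β) (init : β) {a : _root_.Int} (ha : 0 ≤ a) :
    (pyRange a (len xs) 1).foldl (fun acc j => f acc (pyGetD xs j d)) init = (xs.drop a.toNat).foldl f init := by
  rw [← map_pyGetD_pyRange xs d ha, _root_.List.foldl_map]
theorem foldl_pyRange_zero_pyGetD {β : Type} (xs : _root_.List α) (d : α) (f : β → α → β) (init : β) :
    (pyRange 0 (len xs) 1).foldl (fun acc j => f acc (pyGetD xs j d)) init = xs.foldl f init := by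
  simpa using foldl_pyRange_pyGetD xs d f init (Int.le_refl 0)

theorem foldl_pyRange_pyGetD' {β : Type} (xs : _root_.List α) (d : α) (f : β → α → β) (init : β) {a : _root_.Int} (ha : 0 ≤ a) :
    (pyRange a (xs.length : _root_.Int) 1).foldl (fun acc j => f acc (pyGetD xs j d)) init = (xs.drop a.toNat).foldl f init :=
  foldl_pyRange_pyGetD xs d f init ha
theorem foldl_pyRange_zero_pyGetD' {β : Type} (xs : _root_.List α) (d : α) (f : β → α → β) (init : β) :
    (pyRange 0 (xs.length : _root_.Int) 1).foldl (fun acc j => f acc (pyGetD xs j d)) init = xs.foldl f init :=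
  foldl_pyRange_zero_pyGetD xs d f init

/-- Python 'enumerate(xs, start)': the pairs (index, element), index an Int counting from start. -/
def enumerate (xs : _root_.List α) (start : _root_.Int := 0) : _root_.List (_root_.Int × α) :=
  match xs with
  | [] => []
  | x :: t => (start, x) :: enumerate t (start + 1)
@[simp] theorem enumerate_nil (s : _root_.Int) : enumerate ([] : _root_.List α) s = [] := rfl
@[simp] theorem enumerate_cons (x : α) (xs : _root_.List α) (s : _root_.Int) : enumerate (x :: xs) s = (s, x) :: enumerate xs (s + 1) := rfl
@[simp] theorem length_enumerate (xs : _root_.List α) (s : _root_.Int) : (enumerate xs s).length = xs.length := by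
  induction xs generalizing s <;> simp_all [enumerate]
@[simp] theorem map_snd_enumerate (xs : _root_.List α) (s : _root_.Int) : (enumerate xs s).map (·.2) = xs := by
  induction xs generalizing s <;> simp_all
theorem map_fst_enumerate (xs : _root_.List α) (s : _root_.Int) : (enumerate xs s).map (·.1) = pyRange s (s + xs.length) 1 := by
  induction xs generalizing s with
  | nil => simp
  | cons x t ih =>
    rw [enumerate_cons, _root_.List.map_cons, ih, pyRange_one_cons (a := s) (by simp only [_root_.List.length_cons]; omega)]
    simp only [_root_.List.length_cons]
    rw [show s + 1 + (t.length : _root_.Int) = s + ((t.length + 1 : Nat) : _root_.Int) by omega]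
/-- enumerate as the familiar zipIdx, and element-wise. -/
theorem enumerate_eq_zipIdx_map (xs : _root_.List α) (s : _root_.Int) : enumerate xs s = (xs.zipIdx 0).map (fun p => (s + (p.2 : _root_.Int), p.1)) := by
  induction xs generalizing s with
  | nil => simp
  | cons x t ih =>
    rw [enumerate_cons, ih, _root_.List.zipIdx_cons, _root_.List.map_cons, _root_.List.zipIdx_succ, _root_.List.map_map]
    simp [Function.comp_def]; intro a b _; omega
@[simp] theorem getElem?_enumerate (xs : _root_.List α) (s : _root_.Int) (k : Nat) : (enumerate xs s)[k]? = xs[k]?.map (fun x => (s + k, x)) := by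
  induction xs generalizing s k with
  | nil => simp
  | cons x t ih => cases k with
    | zero => simp
    | succ k => simp [ih]; cases t[k]? <;> simp; omega
theorem getElem_enumerate (xs : _root_.List α) (s : _root_.Int) (k : Nat) (h : k < (enumerate xs s).length) :
    (enumerate xs s)[k] = (s + k, xs[k]'(by simpa using h)) := by
  apply Option.some.inj; rw [← _root_.List.getElem?_eq_getElem, getElem?_enumerate, _root_.List.getElem?_eq_getElem (by simpa using h)]; rfl
theorem mem_enumerate_iff (xs : _root_.List α) (s : _root_.Int) (p : _root_.Int × α) :
    p ∈ enumerate xs s ↔ ∃ (k : Nat) (h : k < xs.length), p = (s + k, xs[k]) := by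
  rw [_root_.List.mem_iff_getElem?]; simp only [getElem?_enumerate]
  constructor
  · rintro ⟨k, hk⟩
    cases hx : xs[k]? with
    | none => simp [hx] at hk
    | some x =>
      obtain ⟨hl, rfl⟩ := _root_.List.getElem?_eq_some_iff.mp hx
      simp [hx] at hk
      exact ⟨k, hl, hk.symm⟩
  · rintro ⟨k, hk, rfl⟩; exact ⟨k, by simp [_root_.List.getElem?_eq_getElem hk]⟩
/-- the indices of enumerate are strictly increasing (so the pairs are duplicate-free). -/
theorem pairwise_lt_enumerate (xs : _root_.List α) (s : _root_.Int) : (enumerate xs s).Pairwise (fun p q => p.1 < q.1) := by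
  have h := pairwise_lt_pyRange_one s (s + xs.length)
  rw [← map_fst_enumerate, _root_.List.pairwise_map] at h; exact h
theorem enumerate_append (xs ys : _root_.List α) (s : _root_.Int) : enumerate (xs ++ ys) s = enumerate xs s ++ enumerate ys (s + xs.length) := by
  induction xs generalizing s with
  | nil => simp
  | cons x t ih =>
    simp only [_root_.List.cons_append, enumerate_cons, ih, _root_.List.length_cons]
    rw [show s + 1 + (t.length : _root_.Int) = s + ((t.length + 1 : Nat) : _root_.Int) by omega]
/-- 'for i, x in enumerate(xs)' with a body that reads xs[i] reads x. -/
theorem enumerate_eq_map_pyRange (xs : _root_.List α) (d : α) : enumerate xs 0 = (pyRange 0 (len xs) 1).map (fun j => (j, pyGetD xs j d)) := by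
  apply _root_.List.ext_getElem?; intro i
  simp only [getElem?_enumerate, _root_.List.getElem?_map, getElem?_pyRange_one, len_eq]
  by_cases hi : i < xs.length
  · simp [hi, _root_.List.getD_eq_getElem?_getD]
  · simp [hi]

/-- alias in the conventional name: membership in one stable-insertion step. -/
theorem mem_insertBy (before : α → α → Bool) (x y : α) (ys : _root_.List α) : y ∈ insertBy before x ys ↔ y = x ∨ y ∈ ys :=
  insertBy_mem_iff before x y ys
theorem sorted_eq_nil_iff {κ : Type} [LT κ] [DecidableLT κ] (xs : _root_.List α) (key : α → κ) (rev : Bool) : sorted xs key rev = [] ↔ xs = [] := by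
  rw [← _root_.List.length_eq_zero_iff, length_sorted, _root_.List.length_eq_zero_iff]
theorem sorted_eq_foldl_insertBy {κ : Type} [LT κ] [DecidableLT κ] (xs : _root_.List α) (key : α → κ) :
    sorted xs key false = xs.foldl (fun acc x => insertBy (fun a b => decide (key a < key b)) x acc) [] := rfl
theorem sorted_rev_eq_foldl_insertBy {κ : Type} [LT κ] [DecidableLT κ] (xs : _root_.List α) (key : α → κ) :
    sorted xs key true = xs.foldl (fun acc x => insertBy (fun a b => decide (key b < key a)) x acc) [] := rfl
/-- an insertion step that finds nothing to precede appends (the key to 'sorted of an already-sorted list'). -/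
theorem insertBy_of_forall_not_before (before : α → α → Bool) (x : α) (ys : _root_.List α) (h : ∀ y ∈ ys, before x y = false) :
    insertBy before x ys = ys ++ [x] := by
  induction ys with
  | nil => rfl
  | cons y t ih => simp only [insertBy, h y _root_.List.mem_cons_self]; simp [ih (fun z hz => h z (_root_.List.mem_cons_of_mem _ hz))]

end List
end PySem
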